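-- pv_equiv track=rewrite | github.com/osmocom/osmo-ci | scripts/verify_log_statements.py | make_line_idx
-- ===== SOURCE A (Python) =====
-- def make_line_idx(file_content):
--   line_idx = []
--   pos = 0
--   line_nr = 1
--   line_idx.append((pos, line_nr))
--   for line in file_content.split('\n'):
--     pos += len(line)
--     line_nr += 1
--     line_idx.append((pos, line_nr))
--     pos += 1 # newline char
--   return line_idx
-- ===== SOURCE B (Python) =====
-- def make_line_idx(file_content):
--   nl = [i for i, c in enumerate(file_content) if c == '\n']
--   return [(0, 1)] + [(p, k + 2) for k, p in enumerate(nl + [len(file_content)])]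
-- ===== Notes on version B (the rewrite author's own statement) =====
-- stated objective: alternative
-- what changed: B replaces A's split-on-newline fold with accumulated segment lengths by two declarative stages: a comprehension collecting the newline indices, then an enumerated comprehension pairing each boundary position (plus the final length) with its line number.
import Mathlib
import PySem

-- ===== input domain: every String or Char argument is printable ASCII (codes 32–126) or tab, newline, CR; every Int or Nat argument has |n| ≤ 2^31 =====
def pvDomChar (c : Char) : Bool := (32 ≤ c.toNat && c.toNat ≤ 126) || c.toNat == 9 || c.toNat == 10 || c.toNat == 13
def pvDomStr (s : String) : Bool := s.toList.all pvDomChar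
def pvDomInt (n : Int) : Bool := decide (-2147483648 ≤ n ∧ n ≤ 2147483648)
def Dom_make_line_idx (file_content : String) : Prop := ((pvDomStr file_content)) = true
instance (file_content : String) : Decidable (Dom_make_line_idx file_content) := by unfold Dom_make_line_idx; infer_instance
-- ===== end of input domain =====

-- B replaces A's split-on-'\n' fold (accumulating segment lengths) by two declarative
-- stages: collect the newline indices, then pair each boundary with its line number
-- (objective: alternative; same O(n) cost).

-- ===== PORT A =====
-- for line in file_content.split('\n'): pos += len(line); line_nr += 1; append; pos += 1
def make_line_idx (file_content : String) : List (Int × Int) :=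
  let st := (PySem.Chars.splitOn file_content.toList ['\n']).foldl
    (fun (st : List (Int × Int) × Int × Int) line =>
      let pos := st.2.1 + (line.length : Int)
      let line_nr := st.2.2 + 1
      (st.1 ++ [(pos, line_nr)], pos + 1, line_nr))
    ([((0 : Int), (1 : Int))], 0, 1)
  st.1

-- ===== PORT B =====
-- nl = [i for i, c in enumerate(file_content) if c == '\n']
-- return [(0, 1)] + [(p, k + 2) for k, p in enumerate(nl + [len(file_content)])]
def make_line_idx_alt (file_content : String) : List (Int × Int) :=
  let nl := (PySem.List.enumerate file_content.toList 0).filterMap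
    (fun p => if p.2 = '\n' then some p.1 else none)
  [((0 : Int), (1 : Int))] ++
    (PySem.List.enumerate (nl ++ [(file_content.toList.length : Int)]) 0).map
      (fun q => (q.2, q.1 + 2))

-- ===== PRECONDITION & SPEC =====
def Spec_make_line_idx (file_content : String) (out : List (Int × Int)) : Prop := out = make_line_idx_alt file_content
instance (file_content : String) (out : List (Int × Int)) : Decidable (Spec_make_line_idx file_content out) := by unfold Spec_make_line_idx; infer_instance

-- ===== CLAIM (what is proved, stated in full; the proofs are below) =====
def Claim_equal_make_line_idx : Prop := ∀ (file_content : String), Dom_make_line_idx file_content → Spec_make_line_idx file_content (make_line_idx file_content)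

-- ===== LEMMAS AND PROOFS =====

-- canonical description: the entries contributed after the seed (0,1), starting at
-- position `pos` with next line number `nr`
def pvCanon : List Char → Int → Int → List (Int × Int)
  | [], pos, nr => [(pos, nr)]
  | c :: rest, pos, nr =>
    if c = '\n' then (pos, nr) :: pvCanon rest (pos + 1) (nr + 1)
    else pvCanon rest (pos + 1) nr

-- structural version of PySem.Chars.splitOn on the single-char separator '\n'
def pvSplit : List Char → List (List Char)
  | [] => [[]]
  | c :: rest => if c = '\n' then [] :: pvSplit rest else (pvSplit rest).modifyHead (c :: ·)

theorem pvSplit_ne_nil (cs : List Char) : pvSplit cs ≠ [] := by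
  induction cs with
  | nil => simp [pvSplit]
  | cons c rest ih =>
    simp only [pvSplit]
    split_ifs
    · simp
    · cases h : pvSplit rest with
      | nil => exact absurd h ih
      | cons a b => simp [List.modifyHead]

theorem pvSplit_go_spec : ∀ (fuel : Nat) (l cur : List Char) (acc : List (List Char)), l.length ≤ fuel →
    PySem.Chars.splitOn.go ['\n'] fuel l cur acc = acc.reverse ++ (pvSplit l).modifyHead (cur.reverse ++ ·) := by
  intro fuel
  induction fuel with
  | zero =>
    intro l cur acc h
    have : l = [] := by cases l <;> simp_all
    subst this
    simp [PySem.Chars.splitOn.go, pvSplit]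
  | succ fuel ih =>
    intro l cur acc h
    cases l with
    | nil => simp [PySem.Chars.splitOn.go, pvSplit]
    | cons c rest =>
      simp only [PySem.Chars.splitOn.go]
      by_cases hc : c = '\n'
      · subst hc
        rw [if_pos (by simp [List.isPrefixOf])]
        rw [ih _ _ _ (by simpa using Nat.le_of_succ_le_succ h)]
        cases hms : pvSplit rest <;> simp [pvSplit, List.modifyHead, hms]
      · rw [if_neg (by simp [List.isPrefixOf]; exact fun h => hc h.symm)]
        rw [ih _ _ _ (by simpa using Nat.le_of_succ_le_succ h)]
        simp only [pvSplit, if_neg hc]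
        obtain ⟨hd, tl, hms⟩ : ∃ hd tl, pvSplit rest = hd :: tl := by
          cases hms : pvSplit rest with
          | nil => exact absurd hms (pvSplit_ne_nil rest)
          | cons a b => exact ⟨a, b, rfl⟩
        simp [hms, List.modifyHead]

theorem splitOn_eq_pvSplit (cs : List Char) : PySem.Chars.splitOn cs ['\n'] = pvSplit cs := by
  rw [PySem.Chars.splitOn, pvSplit_go_spec _ _ _ _ (by omega)]
  cases h : pvSplit cs <;> simp [List.modifyHead]

-- A's fold over the segments, characterized by pvCanon
theorem foldA_spec : ∀ (cs : List Char) (L : List (Int × Int)) (pos nr : Int),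
    ((pvSplit cs).foldl
      (fun (st : List (Int × Int) × Int × Int) line =>
        (st.1 ++ [(st.2.1 + (line.length : Int), st.2.2 + 1)],
         st.2.1 + (line.length : Int) + 1, st.2.2 + 1)) (L, pos, nr)).1
      = L ++ pvCanon cs pos (nr + 1) := by
  intro cs
  induction cs with
  | nil => intro L pos nr; simp [pvSplit, pvCanon]
  | cons c rest ih =>
    intro L pos nr
    by_cases hc : c = '\n'
    · subst hc
      simp only [pvSplit, pvCanon, if_true, List.foldl_cons, List.length_nil]
      rw [ih]
      simp [List.append_assoc]
    · simp only [pvSplit, pvCanon, if_neg hc]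
      obtain ⟨hd, tl, hms⟩ : ∃ hd tl, pvSplit rest = hd :: tl := by
        cases hms : pvSplit rest with
        | nil => exact absurd hms (pvSplit_ne_nil rest)
        | cons a b => exact ⟨a, b, rfl⟩
      rw [hms, ← ih L (pos + 1) nr, hms]
      simp only [List.modifyHead, List.foldl_cons, List.length_cons]
      have h1 : pos + ((hd.length + 1 : Nat) : Int) = pos + 1 + (hd.length : Int) := by
        push_cast; ring
      rw [h1]

-- B's two stages, characterized by pvCanon
theorem stagesB_spec : ∀ (cs : List Char) (i k : Int),
    (PySem.List.enumerate
        ((PySem.List.enumerate cs i).filterMap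
          (fun p => if p.2 = '\n' then some p.1 else none)
         ++ [i + (cs.length : Int)]) k).map (fun q => (q.2, q.1 + 2))
      = pvCanon cs i (k + 2) := by
  intro cs
  induction cs with
  | nil =>
    intro i k
    simp [PySem.List.enumerate_nil, PySem.List.enumerate_cons, pvCanon]
  | cons c rest ih =>
    intro i k
    simp only [PySem.List.enumerate_cons, List.filterMap_cons, List.length_cons]
    rw [show (i + ((rest.length + 1 : Nat) : Int)) = i + 1 + (rest.length : Int) by push_cast; ring]
    by_cases hc : c = '\n'
    · subst hc
      simp only [List.cons_append, PySem.List.enumerate_cons, List.map_cons, pvCanon,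
        if_true]
      rw [ih (i + 1) (k + 1)]
      norm_num
      ring_nf
    · simp only [if_neg hc, pvCanon]
      exact ih (i + 1) k

-- ===== VERDICT (by name: the statement is the Claim_ definition above) =====
theorem make_line_idx_spec : Claim_equal_make_line_idx := by
  intro s _
  unfold Spec_make_line_idx make_line_idx make_line_idx_alt
  rw [splitOn_eq_pvSplit]
  have hA := foldA_spec s.toList [((0 : Int), (1 : Int))] 0 1
  have hB := stagesB_spec s.toList 0 0
  norm_num at hA hB ⊢
  rw [hA, hB]
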